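-- pv_equiv track=rewrite | github.com/granitelegend/Personal-109-Python-Problems-for-CCPS | iterated_ordinal_transform.py | ordinal_transform
-- ===== SOURCE A (Python) =====
-- def ordinal_transform(seed, i):
--     while len(seed) <= i:
--         ordinal_count, ordinal_list = {}, []
--         for number in seed:
--             ordinal_count.setdefault(number, 0)
--             ordinal_count[number] += 1
--             ordinal_list.append(ordinal_count[number])
--         seed = seed + ordinal_list
--     return seed[i]
-- ===== SOURCE B (Python) =====
-- def ordinal_transform(seed, i):
--     if -len(seed) <= i < len(seed):
--         return seed[i]
--     counts = {}
--     ords = []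
--     out = list(seed)
--     while len(out) <= i:
--         # extend ords (the ordinal transform of out) over the not-yet-counted suffix,
--         # each position counted exactly once against the persistent counter
--         for x in out[len(ords):]:
--             c = counts.get(x, 0) + 1
--             counts[x] = c
--             ords.append(c)
--         out = out + ords
--     return out[i]
-- ===== Notes on version B (the rewrite author's own statement) =====
-- stated objective: alternative
-- what changed: B keeps one persistent counter and one growing ordinal-transform table, computing each position's ordinal exactly once (and answers in-range indices directly), instead of A rebuilding the dict and rescanning the whole sequence from scratch on every doubling pass.
-- outside the precondition, e.g. on ordinal_transform([1, 2], -3): A raises IndexError, B raises IndexError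
import Mathlib
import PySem

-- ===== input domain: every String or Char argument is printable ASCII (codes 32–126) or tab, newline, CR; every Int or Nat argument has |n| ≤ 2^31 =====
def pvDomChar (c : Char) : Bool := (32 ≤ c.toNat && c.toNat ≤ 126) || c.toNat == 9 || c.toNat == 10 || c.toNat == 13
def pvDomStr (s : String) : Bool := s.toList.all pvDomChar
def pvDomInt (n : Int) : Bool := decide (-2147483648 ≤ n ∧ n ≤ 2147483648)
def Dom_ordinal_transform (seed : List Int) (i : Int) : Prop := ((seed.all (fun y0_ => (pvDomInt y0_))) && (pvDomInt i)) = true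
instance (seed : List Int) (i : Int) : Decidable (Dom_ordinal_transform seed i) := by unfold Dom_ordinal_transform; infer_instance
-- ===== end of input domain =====

-- B answers in-range indices directly and otherwise computes each position's ordinal exactly
-- once with a persistent counter and a growing table, instead of A's per-pass dict rebuild
-- and full rescan.

-- ===== PORT A =====
-- one iteration of A's inner for-loop: setdefault + increment + append the updated count
def pvStepA (st : PySem.Dict Int Int × List Int) (number : Int) : PySem.Dict Int Int × List Int :=
  let c := st.1.getD number 0 + 1
  (st.1.insert number c, st.2 ++ [c])

-- ordinal_count, ordinal_list = {}, []; for number in seed: ...  → ordinal_list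
def pvOrdListA (seed : List Int) : List Int :=
  (seed.foldl pvStepA (PySem.Dict.empty, [])).2

-- the while-loop; fuel i.toNat+1 is ample: each pass grows a nonempty seed by ≥ 1
def pvLoopA : Nat → List Int → Int → List Int
  | 0, seed, _ => seed
  | f + 1, seed, i =>
      if (seed.length : Int) ≤ i then pvLoopA f (seed ++ pvOrdListA seed) i else seed

def ordinal_transform (seed : List Int) (i : Int) : Int :=
  (PySem.List.pyGet? (pvLoopA (i.toNat + 1) seed i) i).getD 0

-- ===== PORT B =====
-- B's per-element update: c = counts.get(x, 0) + 1; counts[x] = c; ords.append(c)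
def pvStepB (st : PySem.Dict Int Int × List Int) (x : Int) : PySem.Dict Int Int × List Int :=
  let c := st.1.getD x 0 + 1
  (st.1.insert x c, st.2 ++ [c])

-- B's outer while (same fuel as A's port); the inner for runs over the slice out[len(ords):]
def pvLoopB : Nat → List Int → PySem.Dict Int Int → List Int → Int → List Int
  | 0, out, _, _, _ => out
  | f + 1, out, counts, ords, i =>
      if (out.length : Int) ≤ i then
        let st := (PySem.List.slice out (some (ords.length : Int)) none).foldl pvStepB (counts, ords)
        pvLoopB f (out ++ st.2) st.1 st.2 i
      else out

def ordinal_transform_alt (seed : List Int) (i : Int) : Int :=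
  if -(seed.length : Int) ≤ i ∧ i < (seed.length : Int) then
    (PySem.List.pyGet? seed i).getD 0
  else
    (PySem.List.pyGet? (pvLoopB (i.toNat + 1) seed PySem.Dict.empty [] i) i).getD 0

-- ===== PRECONDITION & SPEC =====
-- Pre_ excludes exactly where the Python A does not return: seed = [] (A loops forever for
-- i ≥ 0 and raises IndexError for i < 0) and i < -len(seed) (IndexError, seed never grows).
def Pre_ordinal_transform (seed : List Int) (i : Int) : Prop :=
  seed ≠ [] ∧ -(seed.length : Int) ≤ i
instance (seed : List Int) (i : Int) : Decidable (Pre_ordinal_transform seed i) := by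
  unfold Pre_ordinal_transform; infer_instance

def pvWitness_ordinal_transform : List Int × Int := ([1, 2], 5)

def Spec_ordinal_transform (seed : List Int) (i : Int) (out : Int) : Prop := out = ordinal_transform_alt seed i
instance (seed : List Int) (i : Int) (out : Int) : Decidable (Spec_ordinal_transform seed i out) := by unfold Spec_ordinal_transform; infer_instance

-- ===== CLAIM (what is proved, stated in full; the proofs are below) =====
def Claim_equal_ordinal_transform : Prop := ∀ (seed : List Int) (i : Int), Dom_ordinal_transform seed i → Pre_ordinal_transform seed i → Spec_ordinal_transform seed i (ordinal_transform seed i)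

-- ===== LEMMAS AND PROOFS =====

theorem pvStepB_eq_pvStepA : pvStepB = pvStepA := rfl

-- the fold appends exactly one ordinal per element
theorem pvFold_snd_length (l : List Int) (d : PySem.Dict Int Int) (acc : List Int) :
    ((l.foldl pvStepA (d, acc)).2).length = acc.length + l.length := by
  induction l generalizing d acc with
  | nil => rfl
  | cons x xs ih =>
    rw [List.foldl_cons]
    show ((xs.foldl pvStepA (_, acc ++ [_])).2).length = _
    rw [ih]
    simp; omega

-- loop invariant: if (counts, ords) is the fold of the step over the processed prefix,
-- B's outer loop produces exactly A's sequence
theorem pvLoop_eq (f : Nat) (out : List Int) (counts : PySem.Dict Int Int) (ords : List Int)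
    (i : Int) (hn : ords.length ≤ out.length)
    (hinv : (counts, ords) = (out.take ords.length).foldl pvStepA (PySem.Dict.empty, [])) :
    pvLoopB f out counts ords i = pvLoopA f out i := by
  induction f generalizing out counts ords with
  | zero => rfl
  | succ f ih =>
    rw [pvLoopB, pvLoopA]
    by_cases h : (out.length : Int) ≤ i
    · rw [if_pos h, if_pos h]
      have hfull : (out.drop ords.length).foldl pvStepA (counts, ords) =
          out.foldl pvStepA (PySem.Dict.empty, []) := by
        conv_rhs => rw [← List.take_append_drop ords.length out, List.foldl_append, ← hinv]
      rw [PySem.List.slice_from_natCast, pvStepB_eq_pvStepA]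
      simp only [hfull]
      have hord : (out.foldl pvStepA (PySem.Dict.empty, [])).2 = pvOrdListA out := rfl
      have hlen : (pvOrdListA out).length = out.length := by
        rw [pvOrdListA.eq_def, pvFold_snd_length]; simp
      rw [hord]
      apply ih
      · simp [hlen]
      · rw [hlen, show (out ++ pvOrdListA out).take out.length = out from by simp]
        rfl
    · rw [if_neg h, if_neg h]

-- ===== VERDICT (by name: the statement is the Claim_ definition above) =====
theorem ordinal_transform_spec : Claim_equal_ordinal_transform := by
  intro seed i _ _
  unfold Spec_ordinal_transform ordinal_transform ordinal_transform_alt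
  by_cases hc : -(seed.length : Int) ≤ i ∧ i < (seed.length : Int)
  · rw [if_pos hc, pvLoopA, if_neg (by omega)]
  · rw [if_neg hc, pvLoop_eq (i.toNat + 1) seed PySem.Dict.empty [] i (Nat.zero_le _) rfl]
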